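-- pv_equiv track=rewrite | github.com/Echeverrias/IE | src/utilities/utilities.py | get_text_after_sub
-- ===== SOURCE A (Python) =====
-- def get_text_after_sub(text, sub, distance=5, separators=['.', '\n', ',']):
--     """
--         A substring is looked for into a text. If exists, from its index is taken a substring with length equal to distance,
--         in the right part, to create a new string. If separators has strings, they are looking for in the new substring.
--         If a string from the list exist in the new substring, another substring is created that starts from the string list
--         founded until the end.
--
--         :param text: a string.
--         :param sub: a string. A subtring to look into text param
--         :param distance: a integer. The length of the new substring to return.
--         :param separators: a list of strings. Look these stings in the new substring.
--         :return: a string. A substring with the text before the substring 'sub' in the 'text' variable.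
--         """
--     i_sub = text.lower().find(sub.lower())
--     if i_sub <0 or (i_sub + len(sub) == len(text)):
--         return ""
--     else:
--         i_start = i_sub + len(sub)
--         i_right = min(i_start + distance, len(text))
--         i_separators = [text[i_start:i_right].find(separator) for separator in separators]
--         i_separators = [i_start + i for i in i_separators if i >= 0]
--         if i_separators:
--             i_right = min(i_right, *i_separators)
--     return text[i_start:i_right].strip()
-- ===== SOURCE B (Python) =====
-- def get_text_after_sub(text, sub, distance=5, separators=['.', '\n', ',']):
--     i_sub = text.lower().find(sub.lower())
--     if i_sub < 0 or i_sub + len(sub) == len(text):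
--         return ""
--     i_start = i_sub + len(sub)
--     window = text[i_start:min(i_start + distance, len(text))]
--     cut = len(window)
--     for p in range(len(window)):
--         if any(window.startswith(sep, p) for sep in separators):
--             cut = p
--             break
--     return window[:cut].strip()
-- ===== Notes on version B (the rewrite author's own statement) =====
-- stated objective: simpler
-- what changed: Instead of building a list of per-separator find results, offsetting/filtering it and folding min over it, B slices the window once and does a single left-to-right scan that stops at the first position where any separator starts; negative distance is outside Pre_ (a distance is a length, the natural domain is 0 <= distance).
-- outside the precondition, e.g. on get_text_after_sub('ax.bcdefgh', 'a', -8, ['.']): A returns 'x.', B returns 'x'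
import Mathlib
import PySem

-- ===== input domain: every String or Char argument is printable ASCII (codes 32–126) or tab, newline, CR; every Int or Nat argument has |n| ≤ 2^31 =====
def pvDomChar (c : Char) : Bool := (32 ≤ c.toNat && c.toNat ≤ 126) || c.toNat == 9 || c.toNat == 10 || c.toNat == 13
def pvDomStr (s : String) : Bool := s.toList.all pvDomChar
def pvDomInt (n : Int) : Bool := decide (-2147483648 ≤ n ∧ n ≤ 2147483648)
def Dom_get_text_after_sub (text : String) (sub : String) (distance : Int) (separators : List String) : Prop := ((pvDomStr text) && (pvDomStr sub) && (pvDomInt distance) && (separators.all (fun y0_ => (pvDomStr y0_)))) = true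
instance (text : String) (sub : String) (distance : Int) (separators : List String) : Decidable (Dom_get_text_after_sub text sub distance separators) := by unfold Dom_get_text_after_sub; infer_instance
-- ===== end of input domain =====

-- B replaces A's build-list-of-finds / filter / offset / fold-min pipeline by a single
-- left-to-right scan of the window that stops at the first separator start (objective: simpler).


-- ===== PORT A =====
def get_text_after_sub (text : String) (sub : String) (distance : Int) (separators : List String) : String :=
  let i_sub : Int := PySem.Str.find (PySem.Str.lower text) (PySem.Str.lower sub)
  if i_sub < 0 ∨ i_sub + PySem.Str.len sub = PySem.Str.len text then ""
  else
    let i_start : Int := i_sub + PySem.Str.len sub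
    let i_right : Int := min (i_start + distance) (PySem.Str.len text)
    let i_separators : List Int :=
      separators.map (fun separator => PySem.Str.find (PySem.Str.slice text (some i_start) (some i_right)) separator)
    let i_separators2 : List Int := (i_separators.filter (fun i => decide (0 ≤ i))).map (fun i => i_start + i)
    let i_right2 : Int := if i_separators2 ≠ [] then i_separators2.foldl min i_right else i_right
    PySem.Str.strip (PySem.Str.slice text (some i_start) (some i_right2))

-- ===== PORT B =====
-- the scan loop of Source B: first index p of wl at which some separator starts
-- (Python's window.startswith(sep, p) with 0 ≤ p ≤ len(window) is exactly
--  PySem.Chars.startswith (wl.drop p) sep, computed here suffix by suffix)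
def pvScanCut (seps : List (List Char)) : List Char → Nat
  | [] => 0
  | c :: rest => if seps.any (fun s => PySem.Chars.startswith (c :: rest) s) then 0 else pvScanCut seps rest + 1

def get_text_after_sub_alt (text : String) (sub : String) (distance : Int) (separators : List String) : String :=
  let i_sub : Int := PySem.Str.find (PySem.Str.lower text) (PySem.Str.lower sub)
  if i_sub < 0 ∨ i_sub + PySem.Str.len sub = PySem.Str.len text then ""
  else
    let i_start : Int := i_sub + PySem.Str.len sub
    let window : List Char := (PySem.Str.slice text (some i_start) (some (min (i_start + distance) (PySem.Str.len text)))).toList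
    let cut : Nat := pvScanCut (separators.map String.toList) window
    String.ofList (PySem.Chars.strip (window.take cut))

-- ===== PRECONDITION & SPEC =====
-- Pre_ restricts to the function's natural domain: 'distance' is the length of the window,
-- so 0 ≤ distance; for negative distance A feeds a negative (from-the-end) stop index into
-- min against window-relative separator offsets, while B simply cuts at the separator.
def Pre_get_text_after_sub (text : String) (sub : String) (distance : Int) (separators : List String) : Prop := 0 ≤ distance
instance (text : String) (sub : String) (distance : Int) (separators : List String) : Decidable (Pre_get_text_after_sub text sub distance separators) := by unfold Pre_get_text_after_sub; infer_instance
def pvWitness_get_text_after_sub : String × String × Int × List String := ("ab.cd", "a", 5, [".", ","])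
def Spec_get_text_after_sub (text : String) (sub : String) (distance : Int) (separators : List String) (out : String) : Prop := out = get_text_after_sub_alt text sub distance separators
instance (text : String) (sub : String) (distance : Int) (separators : List String) (out : String) : Decidable (Spec_get_text_after_sub text sub distance separators out) := by unfold Spec_get_text_after_sub; infer_instance

-- ===== CLAIM (what is proved, stated in full; the proofs are below) =====
def Claim_equal_get_text_after_sub : Prop := ∀ (text : String) (sub : String) (distance : Int) (separators : List String), Dom_get_text_after_sub text sub distance separators → Pre_get_text_after_sub text sub distance separators → Spec_get_text_after_sub text sub distance separators (get_text_after_sub text sub distance separators)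

-- ===== LEMMAS AND PROOFS =====

theorem pv_foldl_min_le_init (l : List Int) (a : Int) : l.foldl min a ≤ a := by
  induction l generalizing a with
  | nil => simp
  | cons x xs ih => exact le_trans (ih (min a x)) (min_le_left a x)

theorem pv_foldl_min_le_mem (l : List Int) (a x : Int) (h : x ∈ l) : l.foldl min a ≤ x := by
  induction l generalizing a with
  | nil => simp at h
  | cons y ys ih =>
    rcases List.mem_cons.mp h with rfl | h'
    · exact le_trans (pv_foldl_min_le_init ys (min a x)) (min_le_right a x)
    · exact ih (min a y) h'

theorem pv_le_foldl_min (l : List Int) (a c : Int) (h1 : c ≤ a) (h : ∀ x ∈ l, c ≤ x) : c ≤ l.foldl min a := by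
  induction l generalizing a with
  | nil => simpa
  | cons y ys ih =>
    exact ih (min a y) (le_min h1 (h y (List.mem_cons_self))) (fun x hx => h x (List.mem_cons_of_mem _ hx))

theorem pvScanCut_le (seps : List (List Char)) (wl : List Char) : pvScanCut seps wl ≤ wl.length := by
  induction wl with
  | nil => simp [pvScanCut]
  | cons c rest ih =>
    simp only [pvScanCut, List.length_cons]
    split
    · omega
    · omega

theorem pvScanCut_not_hit (seps : List (List Char)) (wl : List Char) :
    ∀ p < pvScanCut seps wl, ¬ ∃ s ∈ seps, s <+: wl.drop p := by
  induction wl with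
  | nil => simp [pvScanCut]
  | cons c rest ih =>
    intro p hp
    simp only [pvScanCut] at hp
    split at hp
    · omega
    · rename_i hany
      cases p with
      | zero =>
        rintro ⟨s, hs, hpre⟩
        exact hany (List.any_eq_true.mpr ⟨s, hs, (PySem.Chars.startswith_iff _ _).mpr hpre⟩)
      | succ q =>
        have := ih q (by omega)
        simpa using this

theorem pvScanCut_hit (seps : List (List Char)) (wl : List Char)
    (h : pvScanCut seps wl < wl.length) : ∃ s ∈ seps, s <+: wl.drop (pvScanCut seps wl) := by
  induction wl with
  | nil => simp [pvScanCut] at h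
  | cons c rest ih =>
    by_cases hany : seps.any (fun s => PySem.Chars.startswith (c :: rest) s)
    · simp only [pvScanCut, if_pos hany]
      rcases List.any_eq_true.mp hany with ⟨s, hs, hsw⟩
      exact ⟨s, hs, (PySem.Chars.startswith_iff _ _).mp hsw⟩
    · simp only [pvScanCut, if_neg hany, List.length_cons] at h ⊢
      have := ih (by omega)
      simpa using this

-- a separator starts somewhere in wl iff its find is nonnegative
theorem pv_find_nonneg_iff_hit (wl s : List Char) :
    0 ≤ PySem.Chars.find wl s ↔ ∃ j, s <+: wl.drop j := by
  rw [PySem.Chars.find_nonneg_iff, ← PySem.Chars.isIn_iff_infix,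
    ← PySem.Chars.exists_prefix_drop_iff_isIn]

theorem pv_cut_eq_length_of_no_sep (seps : List (List Char)) (wl : List Char)
    (h : ∀ s ∈ seps, ¬ 0 ≤ PySem.Chars.find wl s) : pvScanCut seps wl = wl.length := by
  rcases Nat.lt_or_ge (pvScanCut seps wl) wl.length with hlt | hge
  · rcases pvScanCut_hit seps wl hlt with ⟨s, hs, hpre⟩
    exact absurd ((pv_find_nonneg_iff_hit wl s).mpr ⟨_, hpre⟩) (h s hs)
  · exact le_antisymm (pvScanCut_le seps wl) hge

theorem pv_foldl_min_eq_cut (seps : List (List Char)) (wl : List Char) (a : Int) :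
    (((seps.map (PySem.Chars.find wl)).filter (fun i => decide (0 ≤ i))).map (fun i => a + i)).foldl
      min (a + wl.length) = a + pvScanCut seps wl := by
  set offs := (((seps.map (PySem.Chars.find wl)).filter (fun i => decide (0 ≤ i))).map (fun i => a + i)) with hoffs
  have hcut_le : (pvScanCut seps wl : Int) ≤ wl.length := by exact_mod_cast pvScanCut_le seps wl
  apply le_antisymm
  · -- some element of offs is ≤ a + cut (or cut = length and the init works)
    rcases Nat.lt_or_ge (pvScanCut seps wl) wl.length with hlt | hge
    · rcases pvScanCut_hit seps wl hlt with ⟨s, hs, hpre⟩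
      set f := PySem.Chars.find wl s with hf
      have hf0 : 0 ≤ f := (pv_find_nonneg_iff_hit wl s).mpr ⟨_, hpre⟩
      have hfle : f.toNat ≤ pvScanCut seps wl := by
        by_contra hcon
        exact (PySem.Chars.find_spec hf0).2 (pvScanCut seps wl) (by omega) hpre
      have hmem : a + f ∈ offs := by
        rw [hoffs]
        exact List.mem_map.mpr ⟨f, List.mem_filter.mpr ⟨List.mem_map.mpr ⟨s, hs, rfl⟩, by simpa using hf0⟩, rfl⟩
      exact le_trans (pv_foldl_min_le_mem offs _ _ hmem) (by omega)
    · have : pvScanCut seps wl = wl.length := le_antisymm (pvScanCut_le seps wl) hge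
      rw [this]
      exact pv_foldl_min_le_init offs _
  · -- a + cut is ≤ the init and every element of offs
    apply pv_le_foldl_min
    · omega
    · intro x hx
      rw [hoffs] at hx
      rcases List.mem_map.mp hx with ⟨f, hfmem, rfl⟩
      rcases List.mem_filter.mp hfmem with ⟨hfinds, hf0'⟩
      have hf0 : 0 ≤ f := by simpa using hf0'
      rcases List.mem_map.mp hfinds with ⟨s, hs, rfl⟩
      rcases (pv_find_nonneg_iff_hit wl s).mp hf0 with ⟨j, _⟩
      have hpre := (PySem.Chars.find_spec hf0).1
      have hcutle : pvScanCut seps wl ≤ (PySem.Chars.find wl s).toNat := by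
        by_contra hcon
        exact pvScanCut_not_hit seps wl _ (by omega) ⟨s, hs, hpre⟩
      omega

-- ===== VERDICT (by name: the statement is the Claim_ definition above) =====
set_option maxHeartbeats 1000000 in
theorem get_text_after_sub_spec : Claim_equal_get_text_after_sub := by
  intro text sub distance separators _hDom hPre
  unfold Spec_get_text_after_sub
  unfold get_text_after_sub get_text_after_sub_alt
  dsimp only
  split
  · rfl
  rename_i hguard
  rw [not_or] at hguard
  obtain ⟨hsub0', hsubne⟩ := hguard
  rw [not_lt] at hsub0'
  set i_sub := PySem.Str.find (PySem.Str.lower text) (PySem.Str.lower sub) with hisub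
  have hconv : i_sub = PySem.Chars.find (PySem.Chars.lower text.toList) (PySem.Chars.lower sub.toList) := by
    rw [hisub, PySem.Str.find_eq]
    simp
  have hfind : 0 ≤ PySem.Chars.find (PySem.Chars.lower text.toList) (PySem.Chars.lower sub.toList) :=
    hconv ▸ hsub0'
  have hprefix := (PySem.Chars.find_spec hfind).1
  have hlen : i_sub.toNat + sub.toList.length ≤ text.toList.length := by
    have h1 := List.IsPrefix.length_le hprefix
    have h2 := PySem.Chars.find_le_length (PySem.Chars.lower text.toList) (PySem.Chars.lower sub.toList)
    simp only [List.length_drop, PySem.Chars.lower, List.length_map] at h1 h2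
    simp only [PySem.Chars.lower] at hconv
    omega
  simp only [PySem.Str.len_eq] at hsubne ⊢
  set a : Nat := i_sub.toNat + sub.toList.length with ha
  have hstart : i_sub + (sub.toList.length : Int) = (a : Int) := by omega
  rw [hstart]
  set e : Nat := (min ((a : Int) + distance) (text.toList.length : Int)).toNat with he
  have hPre' : 0 ≤ distance := hPre
  have hemin : (min ((a : Int) + distance) ((text.toList.length : Nat) : Int)) = (e : Int) := by
    rw [he]; omega
  have hea : a ≤ e := by omega
  have hen : e ≤ text.toList.length := by omega
  rw [hemin]
  -- the window, as a list of characters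
  have hwl : (PySem.Str.slice text (some (a : Int)) (some (e : Int))).toList
      = List.take (e - a) (List.drop a text.toList) := by
    simp [PySem.Str.slice, PySem.List.slice_natCast]
  set wl := List.take (e - a) (List.drop a text.toList) with hwldef
  have hwllen : wl.length = e - a := by
    rw [hwldef]
    simp only [List.length_take, List.length_drop]
    omega
  set seps := separators.map String.toList with hseps
  -- A's list of finds is seps.map (Chars.find wl)
  have hfinds : separators.map
      (fun separator => PySem.Str.find (PySem.Str.slice text (some (a : Int)) (some (e : Int))) separator)
      = seps.map (PySem.Chars.find wl) := by
    rw [hseps, List.map_map]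
    refine List.map_congr_left ?_
    intro s _
    simp [PySem.Str.find_eq, hwl]
  rw [hfinds, hwl]
  set cut := pvScanCut seps wl with hcut
  have hcutle : cut ≤ wl.length := pvScanCut_le seps wl
  set offs := ((seps.map (PySem.Chars.find wl)).filter (fun i => decide (0 ≤ i))).map
      (fun i => (a : Int) + i) with hoffsdef
  by_cases hne : offs ≠ []
  · -- some separator occurs in the window: A's fold-min equals a + cut
    rw [if_pos hne]
    have hfold := pv_foldl_min_eq_cut seps wl (a : Int)
    rw [hwllen] at hfold
    have hEa : (a : Int) + ((e : Nat) - (a : Nat) : Nat) = (e : Int) := by omega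
    rw [hEa] at hfold
    rw [hfold]
    have hslice : (PySem.Str.slice text (some (a : Int)) (some ((a : Int) + cut))).toList
        = wl.take cut := by
      have hc : (a : Int) + (cut : Nat) = ((a + cut : Nat) : Int) := by push_cast; ring
      rw [hc]
      simp only [PySem.Str.slice, String.toList_ofList, PySem.Chars.slice_eq_listSlice,
        PySem.List.slice_natCast]
      rw [hwldef, List.take_take]
      have h3 : a + cut - a = min cut (e - a) := by omega
      rw [h3]
    calc PySem.Str.strip (PySem.Str.slice text (some (a : Int)) (some ((a : Int) + (cut : Nat))))
        = String.ofList (PySem.Str.strip (PySem.Str.slice text (some (a : Int)) (some ((a : Int) + (cut : Nat))))).toList := String.ofList_toList.symm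
      _ = String.ofList (PySem.Chars.strip (wl.take cut)) := by
          rw [PySem.Str.toList_strip, hslice]
  · -- no separator in the window: A keeps i_right = e, B scans to the end
    rw [if_neg hne]
    rw [not_not] at hne
    have hnosep : ∀ s ∈ seps, ¬ 0 ≤ PySem.Chars.find wl s := by
      intro s hs h0
      have hmem : (a : Int) + PySem.Chars.find wl s ∈ offs := by
        rw [hoffsdef]
        exact List.mem_map.mpr ⟨_, List.mem_filter.mpr ⟨List.mem_map.mpr ⟨s, hs, rfl⟩, by simpa using h0⟩, rfl⟩
      rw [hne] at hmem
      simp at hmem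
    have hcuteq : cut = wl.length := pv_cut_eq_length_of_no_sep seps wl hnosep
    calc PySem.Str.strip (PySem.Str.slice text (some (a : Int)) (some (e : Int)))
        = String.ofList (PySem.Str.strip (PySem.Str.slice text (some (a : Int)) (some (e : Int)))).toList := String.ofList_toList.symm
      _ = String.ofList (PySem.Chars.strip (wl.take cut)) := by
          rw [PySem.Str.toList_strip, hwl, hcuteq, List.take_length]
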